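-- pv_equiv track=rewrite | github.com/mdc159/studio54 | modules/autoreason/experiments/v2/run_monte_carlo_constrained.py | aggregate_3way
-- ===== SOURCE A (Python) =====
-- def aggregate_3way(rankings):
--     scores = {"A": 0, "B": 0, "AB": 0}
--     points = [3, 2, 1]
--     valid = [r for r in rankings if r is not None]
--     for ranking in valid:
--         for pos, label in enumerate(ranking):
--             if label in scores and pos < len(points):
--                 scores[label] += points[pos]
--     priority = {"A": 0, "B": 1, "AB": 2}
--     ranked = sorted(scores.keys(), key=lambda k: (-scores[k], priority[k]))
--     return ranked[0], scores, valid
-- ===== SOURCE B (Python) =====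
-- def aggregate_3way(rankings):
--     valid = [r for r in rankings if r is not None]
--     points = [3, 2, 1]
--
--     def total(label):
--         return sum(points[pos]
--                    for r in valid
--                    for pos, lab in enumerate(r)
--                    if lab == label and pos < len(points))
--
--     scores = {"A": total("A"), "B": total("B"), "AB": total("AB")}
--     priority = {"A": 0, "B": 1, "AB": 2}
--     winner = max(scores, key=lambda k: (scores[k], -priority[k]))
--     return winner, scores, valid
-- ===== Notes on version B (the rewrite author's own statement) =====
-- stated objective: alternative
-- what changed: B computes each label's total independently as a per-label generator sum (three passes) instead of A's single interleaved dict-mutation pass, and picks the winner with one max(key=(score,-priority)) instead of sorting all keys and taking the head.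
import Mathlib
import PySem

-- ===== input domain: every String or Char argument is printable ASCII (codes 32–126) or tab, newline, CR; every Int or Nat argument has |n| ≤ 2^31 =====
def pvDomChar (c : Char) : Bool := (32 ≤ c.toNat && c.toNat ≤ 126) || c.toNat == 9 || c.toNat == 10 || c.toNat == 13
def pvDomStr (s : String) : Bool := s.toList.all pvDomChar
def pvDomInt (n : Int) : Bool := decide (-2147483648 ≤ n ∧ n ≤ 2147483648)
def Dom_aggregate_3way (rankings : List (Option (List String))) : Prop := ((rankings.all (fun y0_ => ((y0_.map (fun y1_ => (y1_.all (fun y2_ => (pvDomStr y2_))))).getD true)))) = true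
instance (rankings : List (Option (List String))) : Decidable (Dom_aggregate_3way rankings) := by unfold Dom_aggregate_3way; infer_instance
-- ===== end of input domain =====

-- B reorganises A's single interleaved dict-mutation pass into three independent per-label
-- generator sums and replaces sorted(keys)[0] by one max with key (score, -priority); same results.

-- ===== PORT A =====
-- points = [3, 2, 1]
def pvPointsA : List Int := [3, 2, 1]

def aggregate_3way (rankings : List (Option (List String))) : String × (List (String × Int)) × List (List String) :=
  let scores0 : PySem.Dict String Int := PySem.Dict.ofList [("A", 0), ("B", 0), ("AB", 0)]
  let valid : List (List String) := rankings.filterMap id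
  let scores : PySem.Dict String Int :=
    valid.foldl (fun sc ranking =>
      (PySem.List.enumerate ranking).foldl (fun sc pl =>
        if sc.contains pl.2 && decide (pl.1 < (pvPointsA.length : Int)) then
          -- scores[label] += points[pos]; the guard puts pos in range, so pyGetD is exact here
          sc.modify pl.2 0 (· + PySem.List.pyGetD pvPointsA pl.1 0)
        else sc) sc) scores0
  let priority : PySem.Dict String Int := PySem.Dict.ofList [("A", 0), ("B", 1), ("AB", 2)]
  let ranked : List String :=
    PySem.List.sorted2 scores.keys (fun k => -(scores.getD k 0)) (fun k => priority.getD k 0)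
  -- ranked[0]: scores always has the three keys, so ranked is nonempty and headD is exact
  (ranked.headD "", scores.items, valid)

-- ===== PORT B =====
-- sum(points[pos] for r in valid for pos, lab in enumerate(r) if lab == label and pos < len(points))
def pvRowSum (r : List String) (label : String) : Int :=
  ((PySem.List.enumerate r).filterMap (fun pl =>
    if pl.2 = label ∧ pl.1 < ((3:Nat) : Int) then some (PySem.List.pyGetD [3,2,1] pl.1 0) else none)).sum

def pvTotal (valid : List (List String)) (label : String) : Int :=
  (valid.map (fun r => pvRowSum r label)).sum

def aggregate_3way_alt (rankings : List (Option (List String))) : String × (List (String × Int)) × List (List String) :=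
  let valid : List (List String) := rankings.filterMap id
  let scores : PySem.Dict String Int :=
    PySem.Dict.ofList [("A", pvTotal valid "A"), ("B", pvTotal valid "B"), ("AB", pvTotal valid "AB")]
  let priority : PySem.Dict String Int := PySem.Dict.ofList [("A", 0), ("B", 1), ("AB", 2)]
  -- max(scores, key=...): scores is nonempty, so max never raises and getD is exact
  let winner : String :=
    (PySem.List.max2? scores.keys (fun k => scores.getD k 0) (fun k => -(priority.getD k 0))).getD ""
  (winner, scores.items, valid)

-- ===== PRECONDITION & SPEC =====
def Spec_aggregate_3way (rankings : List (Option (List String))) (out : String × (List (String × Int)) × List (List String)) : Prop := out = aggregate_3way_alt rankings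
instance (rankings : List (Option (List String))) (out : String × (List (String × Int)) × List (List String)) : Decidable (Spec_aggregate_3way rankings out) := by unfold Spec_aggregate_3way; infer_instance

-- ===== CLAIM (what is proved, stated in full; the proofs are below) =====
def Claim_equal_aggregate_3way : Prop := ∀ (rankings : List (Option (List String))), Dom_aggregate_3way rankings → Spec_aggregate_3way rankings (aggregate_3way rankings)

-- ===== LEMMAS AND PROOFS =====

-- pvRowSum generalised to an arbitrary enumerate start, for the induction below
def pvRowFrom (r : List String) (i : Int) (label : String) : Int :=
  ((PySem.List.enumerate r i).filterMap (fun pl =>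
    if pl.2 = label ∧ pl.1 < ((3:Nat) : Int) then some (PySem.List.pyGetD [3,2,1] pl.1 0) else none)).sum

theorem pvRowFrom_zero (r : List String) (label : String) : pvRowFrom r 0 label = pvRowSum r label := rfl

theorem pv_ofList_triple (x y z : Int) :
    (PySem.Dict.ofList [("A", x), ("B", y), ("AB", z)]) = PySem.Dict.mk [("A", x), ("B", y), ("AB", z)] := rfl

-- one position's contribution to one label
def pvHit (i : Int) (x label : String) : Int :=
  if x = label ∧ i < ((3:Nat) : Int) then PySem.List.pyGetD [3,2,1] i 0 else 0

theorem pvRowFrom_cons (x : String) (t : List String) (i : Int) (label : String) :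
    pvRowFrom (x :: t) i label = pvHit i x label + pvRowFrom t (i+1) label := by
  by_cases h : x = label ∧ i < ((3:Nat) : Int) <;>
    simp [pvRowFrom, pvHit, PySem.List.enumerate_cons, List.filterMap_cons, h] <;>
    (try (split_ifs <;> simp_all)) <;> (try omega)

-- one step of A's tally on the always-three-key dict
theorem pv_step (i a b c : Int) (x : String) :
    (if (PySem.Dict.mk [("A",a),("B",b),("AB",c)]).contains x && decide (i < (pvPointsA.length : Int)) then
        (PySem.Dict.mk [("A",a),("B",b),("AB",c)]).modify x 0 (· + PySem.List.pyGetD pvPointsA i 0)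
      else PySem.Dict.mk [("A",a),("B",b),("AB",c)])
    = PySem.Dict.mk [("A", a + pvHit i x "A"), ("B", b + pvHit i x "B"), ("AB", c + pvHit i x "AB")] := by
  by_cases hA : x = "A" <;> by_cases hB : x = "B" <;> by_cases hAB : x = "AB" <;> by_cases hi : i < 3 <;>
    simp_all [PySem.Dict.contains, PySem.Dict.modify, PySem.Dict.insert, PySem.Dict.getD,
      PySem.Dict.get?, List.find?, pvPointsA, pvHit] <;>
    (try (split_ifs <;> simp_all)) <;> (try omega) <;>
    (try (rintro (h | h | h) <;> simp_all))

-- A's inner loop over one ranking adds each label's row sum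
theorem pv_foldA_enum (r : List String) (i a b c : Int) :
    (PySem.List.enumerate r i).foldl (fun sc pl =>
        if sc.contains pl.2 && decide (pl.1 < (pvPointsA.length : Int)) then
          sc.modify pl.2 0 (· + PySem.List.pyGetD pvPointsA pl.1 0)
        else sc) (PySem.Dict.mk [("A", a), ("B", b), ("AB", c)])
    = PySem.Dict.mk [("A", a + pvRowFrom r i "A"), ("B", b + pvRowFrom r i "B"), ("AB", c + pvRowFrom r i "AB")] := by
  induction r generalizing i a b c with
  | nil => simp [pvRowFrom, PySem.List.enumerate]
  | cons x t ih =>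
    rw [PySem.List.enumerate_cons]
    simp only [List.foldl]
    rw [pv_step, ih]
    simp only [pvRowFrom_cons, add_assoc]

-- the whole tally loop computes B's three per-label totals
theorem pv_foldA_valid (vs : List (List String)) (a b c : Int) :
    vs.foldl (fun sc ranking =>
      (PySem.List.enumerate ranking).foldl (fun sc pl =>
        if sc.contains pl.2 && decide (pl.1 < (pvPointsA.length : Int)) then
          sc.modify pl.2 0 (· + PySem.List.pyGetD pvPointsA pl.1 0)
        else sc) sc) (PySem.Dict.mk [("A", a), ("B", b), ("AB", c)])
    = PySem.Dict.mk [("A", a + pvTotal vs "A"), ("B", b + pvTotal vs "B"), ("AB", c + pvTotal vs "AB")] := by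
  induction vs generalizing a b c with
  | nil => simp [pvTotal]
  | cons r t ih =>
    simp only [List.foldl]
    rw [pv_foldA_enum, ih]
    simp only [pvTotal, List.map_cons, List.sum_cons, pvRowFrom_zero, add_assoc]

-- A's sorted(keys, key=(-score, priority))[0] is B's max(keys, key=(score, -priority))
theorem pv_winner (ta tb tc : Int) :
    (PySem.List.sorted2 ["A","B","AB"]
        (fun k => -((PySem.Dict.mk [("A",ta),("B",tb),("AB",tc)]).getD k 0))
        (fun k => (PySem.Dict.mk [("A",(0:Int)),("B",1),("AB",2)]).getD k 0)).headD ""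
    = (PySem.List.max2? ["A","B","AB"]
        (fun k => (PySem.Dict.mk [("A",ta),("B",tb),("AB",tc)]).getD k 0)
        (fun k => -((PySem.Dict.mk [("A",(0:Int)),("B",1),("AB",2)]).getD k 0))).getD "" := by
  rcases lt_trichotomy ta tb with h1|h1|h1 <;> rcases lt_trichotomy ta tc with h2|h2|h2 <;>
    rcases lt_trichotomy tb tc with h3|h3|h3 <;>
    simp_all [PySem.List.sorted2, PySem.List.max2?, PySem.List.insertBy, List.foldl,
      PySem.Dict.getD, PySem.Dict.get?, List.find?, neg_lt_neg_iff] <;>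
    (try split_ifs) <;> (try simp_all [PySem.List.insertBy, neg_lt_neg_iff]) <;> (try omega) <;>
    (try split_ifs) <;> (try simp_all [PySem.List.insertBy])

-- ===== VERDICT (by name: the statement is the Claim_ definition above) =====
theorem aggregate_3way_spec : Claim_equal_aggregate_3way := by
  intro rankings _
  unfold Spec_aggregate_3way
  simp only [aggregate_3way, aggregate_3way_alt, pv_ofList_triple, pv_foldA_valid, zero_add,
    PySem.Dict.keys, List.map]
  exact congrArg (fun w => (w, _, _)) (pv_winner _ _ _)
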